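-- pv_equiv track=rewrite | github.com/SquareNode/BezierCurves | bezier_curves.py | calc_curve_fs
-- ===== SOURCE A (Python) =====
-- def n_over_k(n,k):
--     if k == 0:
--         return 1
--     if k == n:
--         return 1
--     return n_over_k(n-1, k-1) + n_over_k(n-1, k)
--
-- def get_poly(i,n):
--     """
--
--     takes integer i and n -> degree of curve
--     returns polynomial (n i) * t^i * (1-t)^n-i as arr of coef
--     1 + 2t + t^3 -> [1,2,0,1]
--
--     """
--
--     res,deg = [],n-i
--
--     #calc (1-t)^n-1
--     for j in range(deg+1):
--         res.append((-1)**j*n_over_k(deg, j))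
--     for j in range(deg+1):
--         res[j] *= n_over_k(n, i)
--     #mul t^i
--     for j in range(i):
--         res.insert(0,0)
--
--     return res
--
-- def calc_curve_fs(points):
--     """
--
--     takes arr of points
--     returns tuple - (x(t), y(t))
--
--     """
--
--     poly, deg = [], len(points) - 1
--
--     for i in range(deg + 1):
--         #(n i) * t^i * (1-t)^n-i
--         #n over i
--         poly.append(get_poly(i, deg))
--
--
--     i = 0
--     resx = [0 for i in poly[0]]
--     resy = [0 for i in poly[0]]
--     for pol in poly:
--         curr = 0
--         for c in pol:
--
--             resx[curr] += points[i][0] * c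
--             resy[curr] += points[i][1] * c
--             curr+=1
--
--         i+=1
--
--
--     return(resx,resy)
-- ===== SOURCE B (Python) =====
-- def calc_curve_fs(points):
--     """
--     takes arr of points
--     returns tuple - (x(t), y(t))
--
--     Same result as A, but binomial coefficients come from an iteratively built
--     Pascal's triangle (O(n^2)) instead of the exponential two-branch recursion,
--     and the per-point contributions are added straight into the result arrays
--     with an index offset instead of building per-point polynomial lists.
--     """
--     n = len(points) - 1
--     row = [1]
--     rows = [row]
--     for r in range(1, n + 1):
--         row = [1] + [row[k - 1] + row[k] for k in range(1, r)] + [1]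
--         rows.append(row)
--     resx = [0] * (n + 1)
--     resy = [0] * (n + 1)
--     i = 0
--     for (x, y) in points:
--         b = rows[n][i]
--         row = rows[n - i]
--         j = 0
--         for c0 in row:
--             c = b * c0 if j % 2 == 0 else -b * c0
--             resx[i + j] += x * c
--             resy[i + j] += y * c
--             j += 1
--         i += 1
--     return (resx, resy)
-- ===== Notes on version B (the rewrite author's own statement) =====
-- stated objective: faster
-- what changed: Binomial coefficients are read off an iteratively built Pascal's triangle instead of being recomputed by the exponential two-branch recursion n_over_k, and each point's scaled row is added into the result arrays at an index offset instead of materialising per-point polynomial lists with leading zeros.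
import Mathlib
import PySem

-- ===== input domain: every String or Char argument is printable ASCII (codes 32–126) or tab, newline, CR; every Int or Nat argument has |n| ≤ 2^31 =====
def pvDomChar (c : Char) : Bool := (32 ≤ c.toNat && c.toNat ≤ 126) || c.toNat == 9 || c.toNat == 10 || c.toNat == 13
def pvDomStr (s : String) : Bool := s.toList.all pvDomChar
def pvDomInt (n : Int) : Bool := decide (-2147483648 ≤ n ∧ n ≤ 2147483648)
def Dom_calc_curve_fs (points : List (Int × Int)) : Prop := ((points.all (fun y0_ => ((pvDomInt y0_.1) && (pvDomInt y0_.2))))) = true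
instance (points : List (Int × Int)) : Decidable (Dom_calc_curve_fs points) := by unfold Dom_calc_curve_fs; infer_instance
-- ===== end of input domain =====

-- B replaces A's exponential binomial recursion by an iterative Pascal's triangle and
-- adds each point's scaled row into the result arrays at an offset (objective: faster, asymptotic).


-- ===== PORT A =====
-- n_over_k(n, k): Python checks k == 0, then k == n, else recurses on n-1.
-- For n = 0, k ≠ 0 Python diverges; that call never occurs in calc_curve_fs (0 ≤ k ≤ n always).
def nokA : Nat → Nat → Int
  | _, 0 => 1
  | 0, _ + 1 => 1            -- unreachable within calc_curve_fs (Python diverges here)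
  | n + 1, k + 1 => if k + 1 = n + 1 then 1 else nokA n k + nokA n (k + 1)

-- get_poly(i, n): coefficients of (n i) * t^i * (1-t)^(n-i)
def getPolyA (i n : Nat) : List Int :=
  let deg := n - i
  let res := (List.range (deg + 1)).map (fun j => (-1 : Int) ^ j * nokA deg j)
  let res := res.map (fun c => c * nokA n i)
  List.replicate i 0 ++ res

-- inner loop: for c in pol: resx[curr] += x*c; resy[curr] += y*c; curr += 1
def innerA (x y : Int) : List Int → Nat → List Int → List Int → List Int × List Int
  | [], _, resx, resy => (resx, resy)
  | c :: rest, curr, resx, resy =>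
      innerA x y rest (curr + 1)
        (resx.set curr (resx.getD curr 0 + x * c))
        (resy.set curr (resy.getD curr 0 + y * c))

-- outer loop: for pol in poly (i counts points)
def outerA (points : List (Int × Int)) : List (List Int) → Nat → List Int → List Int → List Int × List Int
  | [], _, resx, resy => (resx, resy)
  | pol :: rest, i, resx, resy =>
      let p := points.getD i (0, 0)
      let r := innerA p.1 p.2 pol 0 resx resy
      outerA points rest (i + 1) r.1 r.2

def calc_curve_fs (points : List (Int × Int)) : List Int × List Int :=
  let deg := points.length - 1
  let poly := (List.range (deg + 1)).map (fun i => getPolyA i deg)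
  let resx := (poly.headD []).map (fun _ => (0 : Int))
  let resy := (poly.headD []).map (fun _ => (0 : Int))
  outerA points poly 0 resx resy

-- ===== PORT B =====
-- row of Pascal's triangle number r from row r-1: [1] + [row[k-1]+row[k] for k in range(1, r)] + [1]
def pascalRowB (row : List Int) (r : Nat) : List Int :=
  [1] ++ (List.range' 1 (r - 1)).map (fun k => row.getD (k - 1) 0 + row.getD k 0) ++ [1]

-- the loop 'for r in range(1, n+1): row = …; rows.append(row)' carrying (rows, row)
def pascalRowsB (n : Nat) : List (List Int) × List Int :=
  (List.range' 1 n).foldl (fun s r => let row := pascalRowB s.2 r; (s.1 ++ [row], row)) ([[1]], [1])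

-- inner loop: for c0 in row: c = ±b*c0; resx[i+j] += x*c; …; j += 1
def innerB (x y b : Int) (i : Nat) : List Int → Nat → List Int → List Int → List Int × List Int
  | [], _, resx, resy => (resx, resy)
  | c0 :: rest, j, resx, resy =>
      let c := if j % 2 = 0 then b * c0 else -(b * c0)
      innerB x y b i rest (j + 1)
        (resx.set (i + j) (resx.getD (i + j) 0 + x * c))
        (resy.set (i + j) (resy.getD (i + j) 0 + y * c))

-- outer loop: for (x, y) in points (i counts points)
def outerB (rows : List (List Int)) (n : Nat) : List (Int × Int) → Nat → List Int → List Int → List Int × List Int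
  | [], _, resx, resy => (resx, resy)
  | (x, y) :: rest, i, resx, resy =>
      let b := (rows.getD n []).getD i 0
      let row := rows.getD (n - i) []
      let r := innerB x y b i row 0 resx resy
      outerB rows n rest (i + 1) r.1 r.2

def calc_curve_fs_alt (points : List (Int × Int)) : List Int × List Int :=
  let n := points.length - 1
  let rows := (pascalRowsB n).1
  outerB rows n points 0 (List.replicate (n + 1) 0) (List.replicate (n + 1) 0)

-- ===== PRECONDITION & SPEC =====
-- Pre_ excludes exactly the empty list, on which Python A raises IndexError (poly[0]).
def Pre_calc_curve_fs (points : List (Int × Int)) : Prop := points ≠ []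
instance (points : List (Int × Int)) : Decidable (Pre_calc_curve_fs points) := by unfold Pre_calc_curve_fs; infer_instance
def pvWitness_calc_curve_fs : (List (Int × Int)) := [(0, 0), (1, 2)]

def Spec_calc_curve_fs (points : List (Int × Int)) (out : List Int × List Int) : Prop := out = calc_curve_fs_alt points
instance (points : List (Int × Int)) (out : List Int × List Int) : Decidable (Spec_calc_curve_fs points out) := by unfold Spec_calc_curve_fs; infer_instance

-- ===== CLAIM (what is proved, stated in full; the proofs are below) =====
def Claim_equal_calc_curve_fs : Prop := ∀ (points : List (Int × Int)), Dom_calc_curve_fs points → Pre_calc_curve_fs points → Spec_calc_curve_fs points (calc_curve_fs points)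

-- ===== LEMMAS AND PROOFS =====

-- the common shape of both inner loops: add a list of increments starting at index k
def addL (acc : List Int) : Nat → List Int → List Int
  | _, [] => acc
  | k, v :: vs => addL (acc.set k (acc.getD k 0 + v)) (k + 1) vs

-- B's increment list: x * (±b*c0) with the sign given by the running index j
def valsB (x b : Int) : List Int → Nat → List Int
  | [], _ => []
  | c0 :: rest, j =>
      (x * (if j % 2 = 0 then b * c0 else -(b * c0))) :: valsB x b rest (j + 1)

def chooseRow (r : Nat) : List Int := (List.range (r + 1)).map (fun k => (r.choose k : Int))

lemma set_getD_add_zero (l : List Int) (k : Nat) : l.set k (l.getD k 0 + 0) = l := by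
  by_cases h : k < l.length
  · rw [add_zero, List.getD_eq_getElem l 0 h, List.set_getElem_self]
  · exact List.set_eq_of_length_le (by omega)

lemma nokA_eq_choose : ∀ n k : Nat, k ≤ n → nokA n k = (n.choose k : Int) := by
  intro n
  induction n with
  | zero => intro k hk; interval_cases k; simp [nokA]
  | succ n ih =>
    intro k hk
    cases k with
    | zero => simp [nokA]
    | succ k =>
      rw [nokA]
      by_cases h : k + 1 = n + 1
      · have hkn : k = n := by omega
        subst hkn; simp
      · have hk' : k + 1 ≤ n := by omega
        rw [if_neg h, ih k (by omega), ih (k+1) hk',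
          Nat.choose_succ_succ' n k]
        push_cast; ring

lemma innerA_eq_addL (x y : Int) : ∀ (pol : List Int) (curr : Nat) (rx ry : List Int),
    innerA x y pol curr rx ry
      = (addL rx curr (pol.map (fun c => x * c)), addL ry curr (pol.map (fun c => y * c))) := by
  intro pol
  induction pol with
  | nil => intro curr rx ry; simp [innerA, addL]
  | cons c rest ih => intro curr rx ry; simp [innerA, addL, ih]

lemma innerB_eq_addL (x y b : Int) (i : Nat) : ∀ (row : List Int) (j : Nat) (rx ry : List Int),
    innerB x y b i row j rx ry
      = (addL rx (i + j) (valsB x b row j), addL ry (i + j) (valsB y b row j)) := by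
  intro row
  induction row with
  | nil => intro j rx ry; simp [innerB, addL, valsB]
  | cons c0 rest ih =>
    intro j rx ry
    simp only [innerB, valsB, addL, ih]
    have h1 : i + (j + 1) = i + j + 1 := by omega
    rw [h1]

lemma addL_replicate_zero : ∀ (i : Nat) (acc : List Int) (k : Nat) (vs : List Int),
    addL acc k (List.replicate i 0 ++ vs) = addL acc (k + i) vs := by
  intro i
  induction i with
  | zero => intro acc k vs; simp
  | succ i ih =>
    intro acc k vs
    have : List.replicate (i+1) (0:Int) ++ vs = 0 :: (List.replicate i 0 ++ vs) := by
      simp [List.replicate_succ]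
    rw [this]
    show addL (acc.set k (acc.getD k 0 + 0)) (k+1) (List.replicate i 0 ++ vs) = _
    rw [set_getD_add_zero, ih]
    congr 1
    omega

lemma chooseRow_getD (r k : Nat) (hk : k ≤ r) : (chooseRow r).getD k 0 = (r.choose k : Int) := by
  unfold chooseRow
  rw [List.getD_eq_getElem _ 0 (by simp; omega)]
  simp

lemma pascal_step (n : Nat) : pascalRowB (chooseRow n) (n + 1) = chooseRow (n + 1) := by
  unfold pascalRowB
  have h1 : (n + 1) - 1 = n := rfl
  rw [h1]
  have hr : List.range (n + 1 + 1) = 0 :: (List.range' 1 n ++ [1 + n]) := by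
    rw [List.range_eq_range', List.range'_succ, ← List.range'_1_concat]
  conv_rhs => rw [chooseRow, hr]
  simp only [List.map_cons, List.map_append, List.map_nil]
  have hmid : (List.range' 1 n).map (fun k => (chooseRow n).getD (k - 1) 0 + (chooseRow n).getD k 0)
      = (List.range' 1 n).map (fun k => ((n + 1).choose k : Int)) := by
    apply List.map_congr_left
    intro k hk
    have hk' : 1 ≤ k ∧ k < 1 + n := List.mem_range'_1.mp hk
    obtain ⟨k', rfl⟩ : ∃ k', k = k' + 1 := ⟨k - 1, by omega⟩
    rw [chooseRow_getD n (k' + 1 - 1) (by omega), chooseRow_getD n (k' + 1) (by omega)]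
    have : k' + 1 - 1 = k' := rfl
    rw [this, Nat.choose_succ_succ' n k']
    push_cast; ring
  rw [hmid]
  have h1n : 1 + n = n + 1 := by omega
  simp [h1n, Nat.choose_self, Nat.choose_zero_right]

lemma pascalRowsB_eq : ∀ n : Nat, pascalRowsB n = ((List.range (n + 1)).map chooseRow, chooseRow n) := by
  intro n
  induction n with
  | zero => simp [pascalRowsB, chooseRow, List.range_succ]
  | succ n ih =>
    unfold pascalRowsB at ih ⊢
    rw [List.range'_1_concat, List.foldl_append, ih]
    simp only [List.foldl_cons, List.foldl_nil]
    have h1n : 1 + n = n + 1 := by omega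
    rw [h1n, pascal_step]
    rw [List.range_succ (n := n + 1)]
    simp

-- A's per-point increments equal B's per-point increments (after the leading zeros)
lemma vals_eq (x B : Int) (d : Nat) : ∀ (m j : Nat),
    valsB x B ((List.range' j m).map (fun k => (d.choose k : Int))) j
      = (List.range' j m).map (fun jj => x * (((-1 : Int) ^ jj * (d.choose jj : Int)) * B)) := by
  intro m
  induction m with
  | zero => intro j; simp [valsB]
  | succ m ih =>
    intro j
    rw [List.range'_succ]
    simp only [List.map_cons, valsB]
    rw [List.cons_eq_cons]
    constructor
    · by_cases hp : j % 2 = 0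
      · rw [if_pos hp, Even.neg_one_pow (Nat.even_iff.mpr hp)]; ring
      · rw [if_neg hp, Odd.neg_one_pow (Nat.odd_iff.mpr (by omega))]; ring
    · exact ih (j + 1)

lemma outer_eq (points : List (Int × Int)) (n : Nat) (hlen : points.length = n + 1) :
    ∀ (ps : List (Int × Int)) (i : Nat) (rx ry : List Int),
      i + ps.length = n + 1 → points.drop i = ps →
      outerA points ((List.range' i ps.length).map (fun k => getPolyA k n)) i rx ry
        = outerB ((List.range (n + 1)).map chooseRow) n ps i rx ry := by
  intro ps
  induction ps with
  | nil => intro i rx ry h1 h2; simp [outerA, outerB]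
  | cons p ps ih =>
    intro i rx ry h1 h2
    obtain ⟨x, y⟩ := p
    have hi : i < points.length := by rw [hlen]; simp at h1; omega
    have hd := List.drop_eq_getElem_cons hi
    rw [h2] at hd
    obtain ⟨hpi, hdrop⟩ := List.cons_eq_cons.mp hd
    simp only [List.length_cons, List.range'_succ, List.map_cons]
    rw [outerA, outerB]
    have hin : i ≤ n := by simp at h1; omega
    set d := n - i with hdef
    -- the rows table entries
    have hbrow : ((List.range (n + 1)).map chooseRow).getD n [] = chooseRow n := by
      rw [List.getD_eq_getElem _ _ (by simp)]; simp
    have hrow : ((List.range (n + 1)).map chooseRow).getD (n - i) [] = chooseRow d := by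
      rw [List.getD_eq_getElem _ _ (by simp)]; simp [hdef]
    have hb : (chooseRow n).getD i 0 = (n.choose i : Int) := chooseRow_getD n i hin
    -- per-point increment lists agree
    have key : ∀ z : Int, (getPolyA i n).map (fun c => z * c)
        = List.replicate i 0 ++ valsB z ((n.choose i : Int)) (chooseRow d) 0 := by
      intro z
      have hB : valsB z ((n.choose i : Int)) (chooseRow d) 0
          = (List.range' 0 (d + 1)).map
              (fun jj => z * (((-1 : Int) ^ jj * (d.choose jj : Int)) * (n.choose i : Int))) := by
        rw [chooseRow, List.range_eq_range']
        exact vals_eq z _ d (d + 1) 0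
      rw [hB]
      unfold getPolyA
      rw [← hdef]
      simp only [List.map_append, List.map_map, List.map_replicate, mul_zero]
      congr 1
      rw [← List.range_eq_range']
      apply List.map_congr_left
      intro j hj
      have hjd : j ≤ d := by simp [List.mem_range] at hj; omega
      simp only [Function.comp]
      rw [nokA_eq_choose d j hjd, nokA_eq_choose n i hin]
    -- one step of both loops agree
    have hstep : innerA (points.getD i (0, 0)).1 (points.getD i (0, 0)).2 (getPolyA i n) 0 rx ry
        = innerB x y ((n.choose i : Int)) i (chooseRow d) 0 rx ry := by
      rw [List.getD_eq_getElem _ _ hi, ← hpi]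
      rw [innerA_eq_addL, innerB_eq_addL]
      rw [key x, key y]
      rw [addL_replicate_zero, addL_replicate_zero]
      simp
    rw [hbrow, hrow, hb, hstep]
    exact ih (i + 1) _ _ (by simp at h1 ⊢; omega) (by rw [hdrop])

-- ===== VERDICT (by name: the statement is the Claim_ definition above) =====
theorem calc_curve_fs_spec : Claim_equal_calc_curve_fs := by
  intro points _ hne
  have h0 : points.length ≠ 0 := by simpa [List.length_eq_zero_iff] using hne
  unfold Spec_calc_curve_fs calc_curve_fs calc_curve_fs_alt
  set n := points.length - 1 with hn
  have hlen : points.length = n + 1 := by omega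
  show outerA points ((List.range (n + 1)).map (fun i => getPolyA i n)) 0
      ((((List.range (n + 1)).map (fun i => getPolyA i n)).headD []).map (fun _ => (0 : Int)))
      ((((List.range (n + 1)).map (fun i => getPolyA i n)).headD []).map (fun _ => (0 : Int)))
    = outerB (pascalRowsB n).1 n points 0 (List.replicate (n + 1) 0) (List.replicate (n + 1) 0)
  rw [pascalRowsB_eq]
  have hhead : ((List.range (n + 1)).map (fun i => getPolyA i n)).headD [] = getPolyA 0 n := by
    rw [List.range_eq_range', List.range'_succ]; simp
  have hinit : (getPolyA 0 n).map (fun _ => (0 : Int)) = List.replicate (n + 1) 0 := by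
    rw [List.map_const']
    congr 1
    simp [getPolyA]
  rw [hhead, hinit]
  have := outer_eq points n hlen points 0
    (List.replicate (n + 1) 0) (List.replicate (n + 1) 0) (by omega) (by simp)
  rw [hlen] at this
  rw [List.range_eq_range'] at this ⊢
  exact this
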